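-- pv_equiv track=rewrite | github.com/opencog/language-learning | src/grammar_learner/incremental_clustering.py | tag_cats
-- ===== SOURCE A (Python) =====
-- def tag_cats(s, dct, prefix = '###', suffix = '###'):                   # 90128
--     # s     :: list of strings read from .ull parse file f.read().splitlines()
--     # dct   :: { word: ###AB### }
--     tagged: list = s[:]  # tagged = copy(s)
--     sentence = True
--     for i in range(0, len(s)):
--         lst: list = s[i].split()
--         if len(lst) == 0:
--             sentence = True
--         elif sentence:
--             tagged[i] = ' '.join([prefix + dct[x] + suffix
--                                   if x in dct else x for x in lst])
--             sentence = False
--         else: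
--             if len(lst) == 4 and lst[0].isdigit() and lst[2].isdigit():
--                 for j in [1, 3]:
--                     if lst[j] in dct:
--                         lst[j] = prefix + dct[lst[j]] + suffix
--                 tagged[i] = ' '.join(lst)
--
--     return '\n'.join(tagged)
-- ===== SOURCE B (Python) =====
-- def tag_cats(s, dct, prefix='###', suffix='###'):
--     # Stateless reformulation: a line is a sentence header exactly when its
--     # predecessor is blank (or it is the first line), so every output line is a
--     # pure function of the (previous, current) line pair; no carried state.
--     def tag(w):
--         return prefix + dct[w] + suffix if w in dct else w
--
--     def render(prev, line):
--         lst = line.split()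
--         if not lst:
--             return line
--         if not prev.split():
--             return ' '.join(map(tag, lst))
--         if len(lst) == 4 and lst[0].isdigit() and lst[2].isdigit():
--             return ' '.join([lst[0], tag(lst[1]), lst[2], tag(lst[3])])
--         return line
--     return '\n'.join(render(p, l) for p, l in zip([''] + s, s))
-- ===== Notes on version B (the rewrite author's own statement) =====
-- stated objective: alternative
-- what changed: Eliminates A's sequential state machine (mutated copy plus a carried 'sentence' flag): B proves the flag is a pure function of the previous line (header iff predecessor blank) and rewrites every line independently as a stateless map over zip of the input with its shift by one.
import Mathlib
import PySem

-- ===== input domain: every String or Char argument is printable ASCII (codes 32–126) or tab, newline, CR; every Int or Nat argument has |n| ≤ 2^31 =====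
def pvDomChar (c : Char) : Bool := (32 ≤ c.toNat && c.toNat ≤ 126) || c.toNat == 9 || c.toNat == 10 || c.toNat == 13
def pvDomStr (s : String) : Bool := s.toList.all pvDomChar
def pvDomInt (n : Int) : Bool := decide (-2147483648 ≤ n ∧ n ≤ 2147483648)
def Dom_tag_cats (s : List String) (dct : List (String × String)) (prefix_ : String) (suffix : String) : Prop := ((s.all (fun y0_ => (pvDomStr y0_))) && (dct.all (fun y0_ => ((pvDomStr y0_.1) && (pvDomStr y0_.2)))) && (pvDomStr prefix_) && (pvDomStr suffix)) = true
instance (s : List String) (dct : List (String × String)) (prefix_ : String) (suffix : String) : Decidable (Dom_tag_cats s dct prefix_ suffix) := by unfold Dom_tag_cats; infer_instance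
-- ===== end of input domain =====

-- B removes A's sequential state machine: the carried 'sentence' flag is shown to be
-- a pure function of the previous line (header iff predecessor blank), so B rewrites
-- each line independently by mapping over the input zipped with its shift by one;
-- objective: alternative (stateless) formulation.

-- ===== PORT A =====
-- one loop iteration of A: state is (tagged, sentence); i is the range index.
-- s[i] is read with pyGet?; .getD "" is never used: i always lies in range(0, len(s)).
def pvStepA (s : List String) (d : PySem.Dict String String) (prefix_ : String) (suffix : String)
    (st : List String × Bool) (i : Int) : List String × Bool :=
  let lst := PySem.Str.split₀ ((PySem.List.pyGet? s i).getD "")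
  if lst.length = 0 then (st.1, true)
  else if st.2 then
    (st.1.set i.toNat (PySem.Str.join " " (lst.map (fun x =>
        match d.get? x with
        | some c => prefix_ ++ c ++ suffix
        | none => x))), false)
  else
    if lst.length == 4
        && PySem.Str.strIsdigit ((PySem.List.pyGet? lst 0).getD "")
        && PySem.Str.strIsdigit ((PySem.List.pyGet? lst 2).getD "") then
      let lst' := ([1, 3] : List Int).foldl (fun l j =>
        match PySem.List.pyGet? l j with
        | some w =>
          match d.get? w with
          | some c => l.set j.toNat (prefix_ ++ c ++ suffix)
          | none => l
        | none => l) lst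
      (st.1.set i.toNat (PySem.Str.join " " lst'), st.2)
    else st

def tag_cats (s : List String) (dct : List (String × String)) (prefix_ : String) (suffix : String) : String :=
  PySem.Str.join "\n"
    (((PySem.List.pyRange 0 s.length 1).foldl (pvStepA s (PySem.Dict.mk dct) prefix_ suffix)
      (s, true)).1)

-- ===== PORT B =====
def pvTagWord (d : PySem.Dict String String) (prefix_ : String) (suffix : String) (x : String) : String :=
  match d.get? x with
  | some c => prefix_ ++ c ++ suffix
  | none => x

-- Source B's render(prev, line): the output line as a pure function of the pair
def pvRender (d : PySem.Dict String String) (prefix_ : String) (suffix : String)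
    (prev : String) (l : String) : String :=
  let lst := PySem.Str.split₀ l
  if lst = [] then l
  else if PySem.Str.split₀ prev = [] then
    PySem.Str.join " " (lst.map (pvTagWord d prefix_ suffix))
  else
    match lst with
    | [a, b, c, e] =>
      if PySem.Str.strIsdigit a && PySem.Str.strIsdigit c then
        PySem.Str.join " " [a, pvTagWord d prefix_ suffix b, c, pvTagWord d prefix_ suffix e]
      else l
    | _ => l

-- '\n'.join(render(p, l) for p, l in zip([''] + s, s))
def tag_cats_alt (s : List String) (dct : List (String × String)) (prefix_ : String) (suffix : String) : String :=
  PySem.Str.join "\n"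
    ((("" :: s).zip s).map (fun pr => pvRender (PySem.Dict.mk dct) prefix_ suffix pr.1 pr.2))

-- ===== PRECONDITION & SPEC =====
def Spec_tag_cats (s : List String) (dct : List (String × String)) (prefix_ : String) (suffix : String) (out : String) : Prop := out = tag_cats_alt s dct prefix_ suffix
instance (s : List String) (dct : List (String × String)) (prefix_ : String) (suffix : String) (out : String) : Decidable (Spec_tag_cats s dct prefix_ suffix out) := by unfold Spec_tag_cats; infer_instance

-- ===== CLAIM (what is proved, stated in full; the proofs are below) =====
def Claim_equal_tag_cats : Prop := ∀ (s : List String) (dct : List (String × String)) (prefix_ : String) (suffix : String), Dom_tag_cats s dct prefix_ suffix → Spec_tag_cats s dct prefix_ suffix (tag_cats s dct prefix_ suffix)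

-- ===== LEMMAS AND PROOFS =====

-- proof-side flat scan: one output line per input line, with A's 'sentence' flag
def pvOutLine (d : PySem.Dict String String) (prefix_ : String) (suffix : String) (sent : Bool) (l : String) : String :=
  let lst := PySem.Str.split₀ l
  if lst = [] then l
  else if sent then PySem.Str.join " " (lst.map (pvTagWord d prefix_ suffix))
  else
    match lst with
    | [a, b, c, e] =>
      if PySem.Str.strIsdigit a && PySem.Str.strIsdigit c then
        PySem.Str.join " " [a, pvTagWord d prefix_ suffix b, c, pvTagWord d prefix_ suffix e]
      else l
    | _ => l

def pvScan (d : PySem.Dict String String) (prefix_ : String) (suffix : String) (sent : Bool) : List String → List String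
  | [] => []
  | l :: rest => pvOutLine d prefix_ suffix sent l ::
      pvScan d prefix_ suffix (decide (PySem.Str.split₀ l = [])) rest

-- each rendered pair is pvOutLine at the flag 'previous line blank'
theorem pvRender_eq_outLine (d : PySem.Dict String String) (prefix_ suffix prev l : String) :
    pvRender d prefix_ suffix prev l
      = pvOutLine d prefix_ suffix (decide (PySem.Str.split₀ prev = [])) l := by
  unfold pvRender pvOutLine
  by_cases h : PySem.Str.split₀ prev = [] <;> simp [h]

-- B's zip-map is the flat scan: the flag is exactly 'predecessor blank'
theorem pvZip_eq_scan (d : PySem.Dict String String) (prefix_ suffix : String) :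
    ∀ (xs : List String) (prev : String),
      ((prev :: xs).zip xs).map (fun pr => pvRender d prefix_ suffix pr.1 pr.2)
        = pvScan d prefix_ suffix (decide (PySem.Str.split₀ prev = [])) xs := by
  intro xs
  induction xs with
  | nil => intro prev; simp [pvScan]
  | cons l rest ih =>
    intro prev
    simp only [List.zip_cons_cons, List.map_cons]
    rw [pvRender_eq_outLine, ih l, pvScan]

-- A's parse-branch foldl on a 4-element list equals the direct construction
theorem pvParse_foldl (d : PySem.Dict String String) (prefix_ suffix a b c e : String) :
    ([1, 3] : List Int).foldl (fun l j =>
        match PySem.List.pyGet? l j with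
        | some w =>
          match d.get? w with
          | some cc => l.set j.toNat (prefix_ ++ cc ++ suffix)
          | none => l
        | none => l) [a, b, c, e]
      = [a, pvTagWord d prefix_ suffix b, c, pvTagWord d prefix_ suffix e] := by
  rcases hb : d.get? b with _ | vb <;> rcases he : d.get? e with _ | ve <;>
    simp [List.foldl, PySem.List.pyGet?, PySem.List.pyIdx?, hb, he, pvTagWord, List.set]

theorem pvTagWord_eq (d : PySem.Dict String String) (prefix_ suffix : String) :
    pvTagWord d prefix_ suffix = (fun x =>
      match d.get? x with
      | some c => prefix_ ++ c ++ suffix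
      | none => x) := rfl

-- each A step on in-range index k with processed prefix t (|t| = k) emits pvOutLine
theorem pvStepA_eq (s : List String) (d : PySem.Dict String String) (prefix_ suffix : String)
    (t : List String) (k : Nat) (hk : k < s.length) (ht : t.length = k) (sent : Bool) :
    pvStepA s d prefix_ suffix (t ++ s.drop k, sent) (k : Int)
      = (t ++ pvOutLine d prefix_ suffix sent s[k] :: s.drop (k + 1),
         decide (PySem.Str.split₀ s[k] = [])) := by
  have hget : PySem.List.pyGet? s (k : Int) = some s[k] := by simp [hk]
  have hset : ∀ v : String, (t ++ s.drop k).set k v = t ++ v :: s.drop (k + 1) := by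
    intro v
    rw [List.drop_eq_getElem_cons hk, List.set_append, if_neg (by omega)]
    have hz : k - t.length = 0 := by omega
    rw [hz, List.set_cons_zero]
  unfold pvStepA pvOutLine
  simp only [hget, Option.getD_some]
  by_cases h0 : PySem.Str.split₀ s[k] = []
  · simp [h0]
  · have hlen : ¬ (PySem.Str.split₀ s[k]).length = 0 := by
      simpa [List.length_eq_zero_iff] using h0
    cases sent with
    | true => simp [h0, hlen, hset, pvTagWord_eq]
    | false =>
      rcases hl : PySem.Str.split₀ s[k] with _ | ⟨a, _ | ⟨b, _ | ⟨c, _ | ⟨e, _ | tl⟩⟩⟩⟩ <;>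
        [exact absurd hl h0; skip; skip; skip; skip; skip]
      · simp [hl, hlen]
      · simp [hl, hlen]
      · simp [hl, hlen]
      · -- the 4-element case
        have h1 : PySem.List.pyGet? [a, b, c, e] (0 : Int) = some a := by
          simp [PySem.List.pyGet?, PySem.List.pyIdx?]
        have h2 : PySem.List.pyGet? [a, b, c, e] (2 : Int) = some c := by
          simp [PySem.List.pyGet?, PySem.List.pyIdx?]
        by_cases hd1 : PySem.Chars.strIsdigit a.toList = true <;>
          by_cases hd2 : PySem.Chars.strIsdigit c.toList = true <;>
          · simp only [hl, h1, h2, Option.getD_some]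
            rw [pvParse_foldl]
            simp [hd1, hd2, hset, hlen]
      · simp [hl, hlen]

-- the flag carried through the flat scan
def pvScanFlag (sent : Bool) : List String → Bool
  | [] => sent
  | l :: rest => pvScanFlag (decide (PySem.Str.split₀ l = [])) rest

-- the main loop invariant: A's fold over range(k, len(s)) = processed prefix ++ flat scan of the suffix
theorem pvFold_eq (s : List String) (d : PySem.Dict String String) (prefix_ suffix : String) :
    ∀ (m : Nat) (k : Nat) (t : List String) (sent : Bool), s.length = k + m → t.length = k →
      (PySem.List.pyRange (k : Int) (s.length : Int) 1).foldl (pvStepA s d prefix_ suffix)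
          (t ++ s.drop k, sent)
        = (t ++ pvScan d prefix_ suffix sent (s.drop k), pvScanFlag sent (s.drop k)) := by
  intro m
  induction m with
  | zero =>
    intro k t sent hm ht
    have hk : s.length = k := by omega
    have hr : PySem.List.pyRange (k : Int) (s.length : Int) 1 = [] :=
      PySem.List.pyRange_one_eq_nil (by omega)
    have hd : s.drop k = [] := List.drop_eq_nil_of_le (by omega)
    simp [hr, hd, pvScan, pvScanFlag]
  | succ m ih =>
    intro k t sent hm ht
    have hk : k < s.length := by omega
    have hr : PySem.List.pyRange (k : Int) (s.length : Int) 1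
        = (k : Int) :: PySem.List.pyRange ((k : Int) + 1) (s.length : Int) 1 :=
      PySem.List.pyRange_one_cons (by exact_mod_cast hk)
    have hcast : ((k : Int) + 1) = ((k + 1 : Nat) : Int) := by push_cast; ring
    have hdrop : s.drop k = s[k] :: s.drop (k + 1) := List.drop_eq_getElem_cons hk
    rw [hr, List.foldl_cons, pvStepA_eq s d prefix_ suffix t k hk ht sent]
    have hmid : t ++ pvOutLine d prefix_ suffix sent s[k] :: s.drop (k + 1)
        = (t ++ [pvOutLine d prefix_ suffix sent s[k]]) ++ s.drop (k + 1) := by simp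
    rw [hmid, hcast,
      ih (k + 1) (t ++ [pvOutLine d prefix_ suffix sent s[k]])
        (decide (PySem.Str.split₀ s[k] = [])) (by omega) (by simp [ht])]
    rw [hdrop]
    simp [pvScan, pvScanFlag]

-- ===== VERDICT (by name: the statement is the Claim_ definition above) =====
theorem tag_cats_spec : Claim_equal_tag_cats := by
  intro s dct prefix_ suffix _
  unfold Spec_tag_cats tag_cats tag_cats_alt
  have h := pvFold_eq s (PySem.Dict.mk dct) prefix_ suffix s.length 0 [] true (by omega) rfl
  simp only [Nat.cast_zero, List.drop_zero, List.nil_append] at h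
  rw [h]
  have hz := pvZip_eq_scan (PySem.Dict.mk dct) prefix_ suffix s ""
  have hblank : decide (PySem.Str.split₀ "" = []) = true := by decide
  rw [hblank] at hz
  rw [hz]
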